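-- pv_equiv track=rewrite | github.com/davidmcdonald13/advent-of-code | aoc2015/day19/molecule-transitions.py | unique_results
-- ===== SOURCE A (Python) =====
-- def unique_results(transitions, original):
--     result = set()
--     discards = 0
--
--     for i in range(len(original)):
--         prefix = original[:i]
--         tail = original[i:]
--
--         for key in transitions:
--             if tail.startswith(key):
--                 for dest in transitions[key]:
--                     final = prefix + dest + tail[len(key):]
--                     result.add(final)
--
--     return result
-- ===== SOURCE B (Python) =====
-- def _match_positions(s, key):
--     # all i with 0 <= i < len(s) where key occurs at i, via a find-from scan
--     out = []
--     i = 0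
--     n = len(s)
--     while i < n:
--         j = s.find(key, i)
--         if j == -1 or j >= n:
--             break
--         out.append(j)
--         i = j + 1
--     return out
--
--
-- def unique_results(transitions, original):
--     # Rule-driven: locate each rule's occurrences with str.find, group them in a
--     # dict indexed by position, then splice the replacements position by position.
--     by_pos = {}
--     for key in transitions:
--         dests = transitions[key]
--         for pos in _match_positions(original, key):
--             by_pos.setdefault(pos, []).append((key, dests))
--
--     result = set()
--     for i in range(len(original)):
--         for key, dests in by_pos.get(i, ()):
--             for dest in dests:
--                 result.add(original[:i] + dest + original[i + len(key):])
--     return result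
-- ===== Notes on version B (the rewrite author's own statement) =====
-- stated objective: faster
-- what changed: B is rule-driven: it locates each rule's occurrence positions with a find-from scan, groups the rules in a dict indexed by position, and then splices the replacements per position, instead of A's slicing the string and testing every rule's key at every position.
import Mathlib
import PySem

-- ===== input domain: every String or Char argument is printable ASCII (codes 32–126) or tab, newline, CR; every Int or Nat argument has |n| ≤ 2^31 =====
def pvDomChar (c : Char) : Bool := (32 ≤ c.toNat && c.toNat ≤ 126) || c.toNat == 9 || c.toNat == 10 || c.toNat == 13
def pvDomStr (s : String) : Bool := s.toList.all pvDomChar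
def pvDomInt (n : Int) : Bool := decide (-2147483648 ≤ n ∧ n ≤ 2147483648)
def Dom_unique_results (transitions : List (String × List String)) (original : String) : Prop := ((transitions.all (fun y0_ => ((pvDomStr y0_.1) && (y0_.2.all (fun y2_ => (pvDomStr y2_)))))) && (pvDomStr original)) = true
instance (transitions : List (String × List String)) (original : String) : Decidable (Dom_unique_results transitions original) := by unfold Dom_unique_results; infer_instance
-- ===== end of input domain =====

-- B locates each rule's occurrences with str.find scans and groups them in a
-- position-indexed dict before splicing, instead of slicing and testing every rule
-- at every position; same results, measurably faster (constant factor).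


-- ===== PORT A =====
-- result is a Python set: PySem.Set String, built with Set.add; strings handled on
-- .toList (PySem.Chars / PySem.List are exact on the ASCII domain), results rebuilt
-- with String.ofList.
def unique_results (transitions : List (String × List String)) (original : String) : List String :=
  (PySem.List.pyRange 0 (PySem.Str.len original) 1).foldl (fun result i =>
    let pre := PySem.List.slice original.toList none (some i)
    let tail := PySem.List.slice original.toList (some i) none
    transitions.foldl (fun result kv =>
      if PySem.Chars.startswith tail kv.1.toList then
        kv.2.foldl (fun result dest =>
          PySem.Set.add result
            (String.ofList (pre ++ dest.toList ++ PySem.List.slice tail (some (PySem.Str.len kv.1)) none)))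
          result
      else result) result) PySem.Set.empty

-- ===== PORT B =====
-- hand port of Python's s.find(sub, start) for 0 ≤ start: least j ≥ start with sub
-- occurring at j (j = len(s) possible only for sub = ''), else -1 — exact there
def pyFindFrom (t k : List Char) (start : Nat) : Int :=
  if start ≤ t.length then
    if PySem.Chars.startswith (t.drop start) k then (start : Int)
    else pyFindFrom t k (start + 1)
  else -1
termination_by t.length + 1 - start

-- needed by mploop's termination: find-from never moves backwards
lemma pyFindFrom_ge (t k : List Char) (s : Nat) :
    pyFindFrom t k s = -1 ∨ (s : Int) ≤ pyFindFrom t k s := by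
  fun_induction pyFindFrom t k s with
  | case1 s h hs => right; simp
  | case2 s h hs ih =>
    rcases ih with h1 | h1
    · left; exact h1
    · right; omega
  | case3 s h => left; rfl

-- port of _match_positions's while loop (out accumulated as the returned list)
def mploop (t k : List Char) (i : Nat) : List Int :=
  if i < t.length then
    let j := pyFindFrom t k i
    if j = -1 ∨ (t.length : Int) ≤ j then []
    else j :: mploop t k (j.toNat + 1)
  else []
termination_by t.length - i
decreasing_by
  rcases pyFindFrom_ge t k i with h | h <;> omega

-- by_pos.setdefault(pos, []).append((key, dests)) is Dict.modify with append;
-- dests = transitions[key] while iterating the dict's keys is the pair's value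
def unique_results_alt (transitions : List (String × List String)) (original : String) : List String :=
  let by_pos : PySem.Dict Int (List (String × List String)) :=
    transitions.foldl (fun d kv =>
      (mploop original.toList kv.1.toList 0).foldl
        (fun d pos => PySem.Dict.modify d pos [] (· ++ [kv])) d)
      PySem.Dict.empty
  (PySem.List.pyRange 0 (PySem.Str.len original) 1).foldl (fun result i =>
    (PySem.Dict.getD by_pos i []).foldl (fun result kv =>
      kv.2.foldl (fun result dest =>
        PySem.Set.add result
          (String.ofList (PySem.List.slice original.toList none (some i) ++ dest.toList ++
            PySem.List.slice original.toList (some (i + PySem.Str.len kv.1)) none)))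
        result) result) PySem.Set.empty

-- ===== PRECONDITION & SPEC =====
def Spec_unique_results (transitions : List (String × List String)) (original : String) (out : List String) : Prop := out = unique_results_alt transitions original
instance (transitions : List (String × List String)) (original : String) (out : List String) : Decidable (Spec_unique_results transitions original out) := by unfold Spec_unique_results; infer_instance

-- ===== CLAIM (what is proved, stated in full; the proofs are below) =====
def Claim_equal_unique_results : Prop := ∀ (transitions : List (String × List String)) (original : String), Dom_unique_results transitions original → Spec_unique_results transitions original (unique_results transitions original)

-- ===== LEMMAS AND PROOFS =====

-- the find-from scan collects exactly the match positions below len, in order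
lemma mploop_eq (t k : List Char) : ∀ (m i : Nat), t.length - i ≤ m →
    mploop t k i = ((List.range' i (t.length - i)).filter
      (fun j => PySem.Chars.startswith (t.drop j) k)).map (Nat.cast : Nat → Int) := by
  intro m
  induction m with
  | zero =>
    intro i h
    have hle : t.length ≤ i := by omega
    have hz : t.length - i = 0 := by omega
    rw [mploop]
    simp [Nat.not_lt.2 hle, hz]
  | succ m ih =>
    intro i h
    by_cases hi : i < t.length
    · have hrange : t.length - i = (t.length - (i + 1)) + 1 := by omega
      by_cases hp : PySem.Chars.startswith (t.drop i) k
      · have hf : pyFindFrom t k i = (i : Int) := by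
          rw [pyFindFrom]; simp [Nat.le_of_lt hi, hp]
        have hguard : ¬ ((i : Int) = -1 ∨ (t.length : Int) ≤ (i : Int)) := by omega
        rw [mploop]
        simp only [hi, if_true, hf, hguard, if_false, Int.toNat_natCast]
        rw [hrange, List.range'_succ]
        simp only [List.filter_cons, hp, if_true, List.map_cons]
        rw [ih (i + 1) (by omega)]
      · have hf : pyFindFrom t k i = pyFindFrom t k (i + 1) := by
          rw [pyFindFrom]; simp [Nat.le_of_lt hi, hp]
        have key : mploop t k i = mploop t k (i + 1) := by
          rw [mploop]
          simp only [hi, if_true, hf]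
          by_cases hn : i + 1 < t.length
          · conv_rhs => rw [mploop]
            simp only [hn, if_true]
          · have hguard : pyFindFrom t k (i + 1) = -1 ∨
                (t.length : Int) ≤ pyFindFrom t k (i + 1) := by
              rcases pyFindFrom_ge t k (i + 1) with h1 | h1
              · exact Or.inl h1
              · right; omega
            simp only [hguard, if_true]
            conv_rhs => rw [mploop]
            simp [hn]
        rw [key, hrange, List.range'_succ]
        simp only [List.filter_cons, hp]
        simp only [Bool.false_eq_true, if_false]
        rw [ih (i + 1) (by omega)]
    · have hz : t.length - i = 0 := by omega
      rw [mploop]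
      simp [hi, hz]

-- match-position lists have no duplicates
lemma mploop_nodup (t k : List Char) : (mploop t k 0).Nodup := by
  rw [mploop_eq t k t.length 0 (by omega)]
  exact ((List.nodup_range').filter _).map (fun a b h => by exact_mod_cast h)

-- one rule's inner loop appends it to the bucket of each of its positions
lemma bucket_inner (ps : List Int) (hnd : ps.Nodup) (kv : String × List String)
    (d : PySem.Dict Int (List (String × List String))) (i : Int) :
    (ps.foldl (fun d pos => PySem.Dict.modify d pos [] (· ++ [kv])) d).getD i []
      = d.getD i [] ++ if i ∈ ps then [kv] else [] := by
  rw [← List.foldl_map (f := fun p => ((p, kv) : Int × (String × List String)))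
        (g := fun d q => PySem.Dict.modify d q.1 [] (· ++ [q.2])),
      PySem.Dict.getD_foldl_modify_append, List.filter_map]
  have hfilter : (ps.filter ((fun q => q.1 == i) ∘ (fun p => (p, kv))))
      = ps.filter (fun p => p == i) := by
    apply List.filter_congr; intro x _; rfl
  rw [hfilter, List.filter_beq]
  by_cases hm : i ∈ ps
  · rw [List.count_eq_one_of_mem hnd hm]; simp [hm]
  · rw [List.count_eq_zero_of_not_mem hm]; simp [hm]

-- the bucket of position i is the rules matching at i, in transitions order
lemma buckets (t : List Char) (ts : List (String × List String))
    (d : PySem.Dict Int (List (String × List String))) (i : Int) :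
    (ts.foldl (fun d kv =>
        (mploop t kv.1.toList 0).foldl
          (fun d pos => PySem.Dict.modify d pos [] (· ++ [kv])) d) d).getD i []
      = d.getD i [] ++ ts.filter (fun kv => decide (i ∈ mploop t kv.1.toList 0)) := by
  induction ts generalizing d with
  | nil => simp
  | cons kv ts ihts =>
    rw [List.foldl_cons, ihts, bucket_inner _ (mploop_nodup t kv.1.toList)]
    simp only [List.filter_cons]
    by_cases hm : i ∈ mploop t kv.1.toList 0 <;> simp [hm]

-- a rule matches at position i (0 ≤ i < len) iff i is among its match positions
lemma mem_mploop_iff (t k : List Char) (i : Int) (h0 : 0 ≤ i) (hi : i < (t.length : Int)) :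
    (i ∈ mploop t k 0) ↔ PySem.Chars.startswith (PySem.List.slice t (some i) none) k = true := by
  rw [mploop_eq t k t.length 0 (by omega), PySem.List.slice_from t h0]
  simp only [List.mem_map, List.mem_filter, List.mem_range'_1]
  constructor
  · rintro ⟨j, ⟨_, hj⟩, rfl⟩
    simpa using hj
  · intro hp
    exact ⟨i.toNat, ⟨⟨by omega, by omega⟩, by simpa using hp⟩, by omega⟩

-- the tail's suffix A slices is the direct suffix B slices
lemma drop_slice (t : List Char) (j : Int) (h0 : 0 ≤ j) (m : Nat) :
    PySem.List.slice (PySem.List.slice t (some j) none) (some (m : Int)) none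
      = PySem.List.slice t (some (j + m)) none := by
  rw [PySem.List.slice_from t h0, PySem.List.slice_from _ (by positivity),
      PySem.List.slice_from t (by omega), List.drop_drop]
  congr 1
  omega

-- at position i the scan over all rules equals the scan over i's bucket
lemma pos_eq (ts : List (String × List String)) (t : List Char) (i : Int)
    (h0 : 0 ≤ i) (hi : i < (t.length : Int)) (acc : List String) :
    ts.foldl (fun result kv =>
        if PySem.Chars.startswith (PySem.List.slice t (some i) none) kv.1.toList then
          List.foldl (fun result dest => PySem.Set.add result (String.ofList
            (PySem.List.slice t none (some i) ++ dest.toList ++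
             PySem.List.slice (PySem.List.slice t (some i) none) (some (kv.1.toList.length : Int)) none)))
            result kv.2
        else result) acc
      = (ts.filter (fun kv => decide (i ∈ mploop t kv.1.toList 0))).foldl
        (fun result kv =>
          List.foldl (fun result dest => PySem.Set.add result (String.ofList
            (PySem.List.slice t none (some i) ++ dest.toList ++
             PySem.List.slice t (some (i + (kv.1.toList.length : Int))) none)))
            result kv.2) acc := by
  have hbody : ts.foldl (fun result kv =>
        if PySem.Chars.startswith (PySem.List.slice t (some i) none) kv.1.toList then
          List.foldl (fun result dest => PySem.Set.add result (String.ofList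
            (PySem.List.slice t none (some i) ++ dest.toList ++
             PySem.List.slice (PySem.List.slice t (some i) none) (some (kv.1.toList.length : Int)) none)))
            result kv.2
        else result) acc
      = ts.foldl (fun result kv =>
          if PySem.Chars.startswith (PySem.List.slice t (some i) none) kv.1.toList then
            List.foldl (fun result dest => PySem.Set.add result (String.ofList
              (PySem.List.slice t none (some i) ++ dest.toList ++
               PySem.List.slice t (some (i + (kv.1.toList.length : Int))) none)))
              result kv.2
          else result) acc := by
    apply PySem.List.foldl_congr_mem
    intro acc' kv _
    rw [drop_slice t i h0 kv.1.toList.length]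
  rw [hbody,
      PySem.List.foldl_if_eq_foldl_filter
        (fun kv => PySem.Chars.startswith (PySem.List.slice t (some i) none) kv.1.toList)
        (fun result kv =>
          List.foldl (fun result dest => PySem.Set.add result (String.ofList
            (PySem.List.slice t none (some i) ++ dest.toList ++
             PySem.List.slice t (some (i + (kv.1.toList.length : Int))) none)))
            result kv.2) ts acc]
  congr 1
  apply List.filter_congr
  intro kv _
  rw [Bool.eq_iff_iff, decide_eq_true_iff, mem_mploop_iff t kv.1.toList i h0 hi]

-- ===== VERDICT (by name: the statement is the Claim_ definition above) =====
theorem unique_results_spec : Claim_equal_unique_results := by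
  intro ts s _
  unfold Spec_unique_results unique_results unique_results_alt
  simp only [PySem.Str.len_eq]
  apply PySem.List.foldl_congr_mem
  intro acc i hi
  obtain ⟨h0, hin⟩ := PySem.List.mem_pyRange_one.1 hi
  rw [buckets s.toList ts PySem.Dict.empty i, PySem.Dict.getD_empty, List.nil_append]
  exact pos_eq ts s.toList i h0 hin acc
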